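-- pv_equiv track=rewrite | github.com/YuvalHilay/2020-missions | untitled10.py | issubireversedstring
-- ===== SOURCE A (Python) =====
-- def issubireversedstring(string, old):
--     zdx = 0#make an obj be 0 (flag)
--     string2 = string[::-1]#make a reverese string of "string"
--     for t in old:
--         j = string2.find(t, zdx)#if substring found in the bigger string make the t to the index that found in string
--         if j != -1:#if it found
--             zdx = j #make zdx to be j
--         else:
--             return False#if is not hidden in reversed
--     return True#if is hidden in reversed
-- ===== SOURCE B (Python) =====
-- def issubireversedstring(string, old):
--     # Index-based algorithm: precompute, per character, the sorted list of its
--     # positions in the reversed string; then for each char of old, binary-search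
--     # the first position >= zdx (A's find never moves past the match, so zdx is
--     # set to the found position itself, not position+1).
--     s2 = string[::-1]
--     pos = {}
--     for i, c in enumerate(s2):
--         pos.setdefault(c, []).append(i)
--     zdx = 0
--     for t in old:
--         lst = pos.get(t)
--         if lst is None:
--             return False
--         lo, hi = 0, len(lst)
--         while lo < hi:
--             mid = (lo + hi) // 2
--             if lst[mid] < zdx:
--                 lo = mid + 1
--             else:
--                 hi = mid
--         if lo == len(lst):
--             return False
--         zdx = lst[lo]
--     return True
-- ===== Notes on version B (the rewrite author's own statement) =====
-- stated objective: alternative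
-- what changed: A rescans the reversed string with string2.find(t, zdx) for every character of old; B instead builds a per-character index of sorted positions in the reversed string in one pass and answers each character of old by a hand-written binary search for the first position >= zdx (keeping A's semantics that zdx is set to the found position itself, not past it).
import Mathlib
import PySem

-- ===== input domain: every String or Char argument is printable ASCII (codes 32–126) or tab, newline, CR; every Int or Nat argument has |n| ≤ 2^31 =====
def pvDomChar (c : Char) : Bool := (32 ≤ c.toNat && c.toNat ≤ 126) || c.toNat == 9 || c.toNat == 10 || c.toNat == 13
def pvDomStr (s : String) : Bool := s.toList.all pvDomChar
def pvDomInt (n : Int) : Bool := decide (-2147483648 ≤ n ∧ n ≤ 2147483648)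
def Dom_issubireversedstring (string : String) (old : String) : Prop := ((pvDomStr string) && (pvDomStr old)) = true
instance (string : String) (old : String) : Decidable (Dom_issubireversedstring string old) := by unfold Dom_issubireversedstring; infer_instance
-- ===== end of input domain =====

-- B replaces A's repeated str.find scans by a precomputed per-character position index plus binary search (alternative indexing algorithm); return value only, no mutation.


-- ===== PORT A =====
-- the for-loop of A: state zdx, early return False when find misses
def aLoop (s2 : List Char) : List Char → Int → Bool
  | [], _ => true
  | t :: ts, zdx =>
      let j := PySem.Chars.findFrom s2 [t] zdx
      if j ≠ -1 then aLoop s2 ts j else false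

def issubireversedstring (string : String) (old : String) : Bool :=
  -- string[::-1]; slice? with step -1 never returns none, so getD's default is dead
  let string2 := (PySem.List.slice? string.toList none none (-1)).getD []
  aLoop string2 old.toList 0

-- ===== PORT B =====
-- 'pos.setdefault(c, []).append(i)' over enumerate(s2): pos[c] = pos.get(c, []) + [i]
def buildPos (s2 : List Char) : PySem.Dict Char (List Int) :=
  (PySem.List.enumerate s2 0).foldl (fun d p => d.modify p.2 [] (fun x => x ++ [p.1])) PySem.Dict.empty

-- Source B's hand-written while-loop binary search; lo, hi, mid are nonnegative ints, so Nat
-- arithmetic and Nat division coincide with Python's '//' here; mid < lst.length whenever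
-- lst[mid] is read, so getD's default is dead
def bsearch (lst : List Int) (zdx : Int) (lo hi : Nat) : Nat :=
  if _h : lo < hi then
    let mid := (lo + hi) / 2
    if lst.getD mid 0 < zdx then bsearch lst zdx (mid + 1) hi else bsearch lst zdx lo mid
  else lo
termination_by hi - lo
decreasing_by all_goals omega

-- the for-loop of Source B: pos.get(t) is None → False, else binary search for first position ≥ zdx
def bLoop (pos : PySem.Dict Char (List Int)) : List Char → Int → Bool
  | [], _ => true
  | t :: ts, zdx =>
      match pos.get? t with
      | none => false
      | some lst =>
          let lo := bsearch lst zdx 0 lst.length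
          if lo = lst.length then false else bLoop pos ts (lst.getD lo 0)

def issubireversedstring_alt (string : String) (old : String) : Bool :=
  let s2 := (PySem.List.slice? string.toList none none (-1)).getD []
  bLoop (buildPos s2) old.toList 0

-- ===== PRECONDITION & SPEC =====
def Spec_issubireversedstring (string : String) (old : String) (out : Bool) : Prop := out = issubireversedstring_alt string old
instance (string : String) (old : String) (out : Bool) : Decidable (Spec_issubireversedstring string old out) := by unfold Spec_issubireversedstring; infer_instance

-- ===== CLAIM (what is proved, stated in full; the proofs are below) =====
def Claim_equal_issubireversedstring : Prop := ∀ (string : String) (old : String), Dom_issubireversedstring string old → Spec_issubireversedstring string old (issubireversedstring string old)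

-- ===== LEMMAS AND PROOFS =====

-- the positions of c in s2 in increasing order: what buildPos stores under key c
def posList (s2 : List Char) (c : Char) : List Int :=
  ((PySem.List.enumerate s2 0).filter (fun p => p.2 == c)).map (fun p => p.1)

lemma buildPos_getD (s2 : List Char) (c : Char) :
    (buildPos s2).getD c [] = posList s2 c := by
  have h : buildPos s2 = List.foldl (fun (d : PySem.Dict Char (List Int)) (q : Char × Int) => d.modify q.1 [] (fun x => x ++ [q.2])) PySem.Dict.empty ((PySem.List.enumerate s2 0).map (fun p => (p.2, p.1))) := (List.foldl_map (f := fun (p : Int × Char) => (p.2, p.1)) (g := fun (d : PySem.Dict Char (List Int)) q => d.modify q.1 [] (fun x => x ++ [q.2])) (l := PySem.List.enumerate s2 0) (init := PySem.Dict.empty)).symm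
  rw [h, PySem.Dict.getD_foldl_modify_append]
  unfold posList
  simp [List.filter_map, Function.comp_def]

lemma buildPos_get?_none (s2 : List Char) (c : Char) :
    (buildPos s2).get? c = none ↔ c ∉ s2 := by
  rw [PySem.Dict.get?_eq_none_iff_contains]
  unfold buildPos
  rw [show (fun (d : PySem.Dict Char (List Int)) (p : Int × Char) => d.modify p.2 [] (fun x => x ++ [p.1]))
      = (fun d p => d.modify ((fun (p : Int × Char) => p.2) p) [] ((fun (_ : PySem.Dict Char (List Int)) (p : Int × Char) => (fun x => x ++ [p.1])) d p)) from rfl]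
  rw [PySem.Dict.contains_eq_decide_mem_keys, PySem.Dict.keys_foldl_modify_key]
  simp [PySem.List.map_snd_enumerate, PySem.Dict.keys_empty]

lemma mem_posList (s2 : List Char) (c : Char) (x : Int) :
    x ∈ posList s2 c ↔ ∃ (k : Nat) (h : k < s2.length), x = (k : Int) ∧ s2[k] = c := by
  unfold posList
  simp only [List.mem_map, List.mem_filter, PySem.List.mem_enumerate_iff]
  constructor
  · rintro ⟨p, ⟨⟨k, hk, rfl⟩, hc⟩, rfl⟩
    simp only [beq_iff_eq] at hc
    exact ⟨k, hk, by simp, hc⟩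
  · rintro ⟨k, hk, rfl, hc⟩
    exact ⟨((k : Int), s2[k]), ⟨⟨k, hk, by simp⟩, by simpa using hc⟩, rfl⟩

lemma posList_pairwise (s2 : List Char) (c : Char) :
    (posList s2 c).Pairwise (· < ·) := by
  unfold posList
  exact List.Pairwise.map _ (fun a b h => h) ((PySem.List.pairwise_lt_enumerate s2 0).filter _)

-- Source B's binary search returns the first index of [lo, hi] whose element is ≥ zdx
lemma bsearch_spec (lst : List Int) (zdx : Int) (lo hi : Nat)
    (hmono : ∀ p q (hp : p < lst.length) (hq : q < lst.length), p ≤ q → lst[p] ≤ lst[q]) :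
    hi ≤ lst.length → lo ≤ hi →
    (∀ i (h : i < lst.length), i < lo → lst[i] < zdx) →
    (∀ i (h : i < lst.length), hi ≤ i → zdx ≤ lst[i]) →
    (∀ i (h : i < lst.length), i < bsearch lst zdx lo hi → lst[i] < zdx) ∧
    (∀ i (h : i < lst.length), bsearch lst zdx lo hi ≤ i → zdx ≤ lst[i]) ∧
    bsearch lst zdx lo hi ≤ hi := by
  fun_induction bsearch lst zdx lo hi with
  | case1 lo hi h mid hlt ih =>
      intro hhi hlh hlo hhi2
      have hmid : mid < lst.length := by omega
      rw [List.getD_eq_getElem lst 0 hmid] at hlt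
      obtain ⟨c1, c2, c3⟩ := ih hhi (by omega)
        (fun i hi' hle => lt_of_le_of_lt (hmono i mid hi' hmid (by omega)) hlt)
        hhi2
      exact ⟨c1, c2, c3⟩
  | case2 lo hi h mid hge ih =>
      intro hhi hlh hlo hhi2
      have hmid : mid < lst.length := by omega
      rw [List.getD_eq_getElem lst 0 hmid] at hge
      push Not at hge
      obtain ⟨c1, c2, c3⟩ := ih (by omega) (by omega) hlo
        (fun i hi' hle => le_trans hge (hmono mid i hmid hi' hle))
      exact ⟨c1, c2, by omega⟩
  | case3 lo hi h =>
      intro hhi hlh hlo hhi2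
      exact ⟨fun i hi' hlt => hlo i hi' hlt, fun i hi' hge => hhi2 i hi' (by omega), by omega⟩

lemma singleton_prefix_drop_iff (t : Char) (s2 : List Char) (i : Nat) :
    [t] <+: s2.drop i ↔ ∃ h : i < s2.length, s2[i] = t := by
  constructor
  · rintro ⟨rest, hrest⟩
    have hl : i < s2.length := by
      by_contra h
      rw [List.drop_eq_nil_iff.2 (by omega)] at hrest
      simp at hrest
    refine ⟨hl, ?_⟩
    rw [List.drop_eq_getElem_cons hl] at hrest
    injection hrest with h1 _
    exact h1.symm
  · rintro ⟨hl, hc⟩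
    rw [List.drop_eq_getElem_cons hl, hc]
    exact ⟨_, rfl⟩

lemma singleton_infix_iff (t : Char) (l : List Char) : [t] <:+: l ↔ t ∈ l := by
  constructor
  · intro h; exact (List.singleton_sublist).1 h.sublist
  · intro h
    obtain ⟨s, u, rfl⟩ := List.append_of_mem h
    exact ⟨s, u, by simp⟩

lemma mem_drop_iff (t : Char) (s2 : List Char) (zdx : Nat) :
    t ∈ s2.drop zdx ↔ ∃ (k : Nat) (h : k < s2.length), zdx ≤ k ∧ s2[k] = t := by
  constructor
  · intro hmem
    obtain ⟨q, hq, hqe⟩ := List.mem_iff_getElem.1 hmem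
    rw [List.length_drop] at hq
    refine ⟨zdx + q, by omega, by omega, ?_⟩
    rw [← hqe, List.getElem_drop]
  · rintro ⟨k, hk, hzk, hke⟩
    rw [List.mem_iff_getElem]
    refine ⟨k - zdx, by rw [List.length_drop]; omega, ?_⟩
    rw [List.getElem_drop]
    have h2 : zdx + (k - zdx) = k := by omega
    simp_rw [h2]
    exact hke

-- main bridge: A's find-loop equals B's index-lookup loop from any start index ≤ |s2|
lemma key (s2 ol : List Char) : ∀ (zdx : Nat), zdx ≤ s2.length →
    aLoop s2 ol (zdx : Int) = bLoop (buildPos s2) ol (zdx : Int) := by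
  induction ol with
  | nil => intro zdx hz; rfl
  | cons t ts ih =>
      intro zdx hz
      have hpw := posList_pairwise s2 t
      rw [List.pairwise_iff_getElem] at hpw
      have hmono : ∀ p q (hp : p < (posList s2 t).length) (hq : q < (posList s2 t).length),
          p ≤ q → (posList s2 t)[p] ≤ (posList s2 t)[q] := by
        intro p q hp hq hle
        rcases Nat.lt_or_ge p q with h | h
        · exact le_of_lt (hpw p q hp hq h)
        · have h2 : p = q := by omega
          subst h2; exact le_refl _
      simp only [aLoop, bLoop]
      cases hg : (buildPos s2).get? t with
      | none =>
          have hnot : t ∉ s2 := (buildPos_get?_none s2 t).1 hg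
          have hfind : PySem.Chars.findFrom s2 [t] (zdx : Int) = -1 := by
            rw [PySem.Chars.findFrom_natCast_eq_neg_one_iff s2 [t] zdx hz, singleton_infix_iff]
            exact fun hmem => hnot (List.mem_of_mem_drop hmem)
          simp [hfind]
      | some lst =>
          have hlst : lst = posList s2 t := by
            have h0 := buildPos_getD s2 t
            rw [PySem.Dict.getD_eq_get?_getD, hg] at h0
            simpa using h0
          subst hlst
          change _ = if bsearch (posList s2 t) (zdx : Int) 0 (posList s2 t).length = (posList s2 t).length then false
              else bLoop (buildPos s2) ts ((posList s2 t).getD (bsearch (posList s2 t) (zdx : Int) 0 (posList s2 t).length) 0)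
          set L := posList s2 t with hL
          set r := bsearch L (zdx : Int) 0 L.length with hr
          obtain ⟨c1, c2, c3⟩ := bsearch_spec L (zdx : Int) 0 L.length hmono (le_refl _) (by omega)
            (by omega) (fun i h hge => absurd h (by omega))
          by_cases hre : r = L.length
          · -- every stored position is < zdx → no occurrence of t at an index ≥ zdx → find misses
            have hfind : PySem.Chars.findFrom s2 [t] (zdx : Int) = -1 := by
              rw [PySem.Chars.findFrom_natCast_eq_neg_one_iff s2 [t] zdx hz, singleton_infix_iff]
              intro hmem
              obtain ⟨k, hk, hzk, hke⟩ := (mem_drop_iff t s2 zdx).1 hmem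
              have hocc : ((k : Nat) : Int) ∈ L := by
                rw [hL, mem_posList]; exact ⟨k, hk, rfl, hke⟩
              obtain ⟨q, hq, hqe⟩ := List.mem_iff_getElem.1 hocc
              have hlt := c1 q hq (by omega)
              rw [hqe] at hlt
              omega
            rw [if_pos hre, hfind]
            simp
          · -- L[r] is the first stored position ≥ zdx; it equals find's result
            have hrlt : r < L.length := by omega
            have hvmem : L[r] ∈ L := List.getElem_mem hrlt
            have hvmem' : L[r] ∈ posList s2 t := hvmem
            obtain ⟨k, hk, hke, hkc⟩ := (mem_posList s2 t _).1 hvmem'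
            have hvge : (zdx : Int) ≤ L[r] := c2 r hrlt (le_refl _)
            have hjne : PySem.Chars.findFrom s2 [t] (zdx : Int) ≠ -1 := by
              rw [Ne, PySem.Chars.findFrom_natCast_eq_neg_one_iff s2 [t] zdx hz, singleton_infix_iff]
              intro hcon
              exact hcon ((mem_drop_iff t s2 zdx).2 ⟨k, hk, by omega, hkc⟩)
            obtain ⟨hj1, hj2, hj3⟩ := PySem.Chars.findFrom_natCast_spec s2 [t] zdx hz hjne
            set j := PySem.Chars.findFrom s2 [t] (zdx : Int) with hjdef
            rw [singleton_prefix_drop_iff] at hj2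
            obtain ⟨hjlt, hjc⟩ := hj2
            have hjk : j.toNat ≤ k := by
              by_contra hgt
              exact (hj3 k (by omega) (by omega)) ((singleton_prefix_drop_iff t s2 k).2 ⟨hk, hkc⟩)
            have hjmem : ((j.toNat : Nat) : Int) ∈ L := by
              rw [hL, mem_posList]; exact ⟨j.toNat, hjlt, rfl, hjc⟩
            obtain ⟨q, hq, hqe⟩ := List.mem_iff_getElem.1 hjmem
            have hqr : r ≤ q := by
              by_contra hlt
              have hx := c1 q hq (by omega)
              rw [hqe] at hx
              omega
            have hkj : L[r] ≤ (j.toNat : Int) := by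
              rw [← hqe]; exact hmono r q hrlt hq hqr
            have hjeq : j = L[r] := by omega
            rw [if_neg hre, if_pos hjne]
            rw [List.getD_eq_getElem L 0 hrlt, ← hjeq]
            have hcast : j = ((j.toNat : Nat) : Int) := by omega
            rw [hcast]
            exact ih j.toNat (by omega)

-- ===== VERDICT (by name: the statement is the Claim_ definition above) =====
theorem issubireversedstring_spec : Claim_equal_issubireversedstring := by
  intro string old _
  unfold Spec_issubireversedstring issubireversedstring issubireversedstring_alt
  simpa using key ((PySem.List.slice? string.toList none none (-1)).getD []) old.toList 0 (by omega)
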